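-- pv_equiv track=rewrite | github.com/rdrbox/EasyRiderBusCompany | helpers.py | transfer_stops
-- ===== SOURCE A (Python) =====
-- def transfer_stops(stop_id_all):
--     transfer_stops_id = set()
--     for i in range(len(stop_id_all) - 1):
--         for k in range(i + 1, len(stop_id_all)):
--             new_id = (set(stop_id_all[i])).intersection(set(stop_id_all[k]))
--             if len(new_id):
--                 transfer_stops_id.update(new_id)
--
--     return transfer_stops_id
-- ===== SOURCE B (Python) =====
-- def transfer_stops(stop_id_all):
--     counts = {}
--     for route in stop_id_all:
--         for s in set(route):
--             counts[s] = counts.get(s, 0) + 1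
--     return {s for s, c in counts.items() if c >= 2}
-- ===== Notes on version B (the rewrite author's own statement) =====
-- stated objective: faster
-- what changed: Replaces A's nested loop over all index pairs with pairwise set intersections by a single pass that counts, per stop id, how many routes contain it, then keeps the ids with count >= 2.
import Mathlib
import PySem

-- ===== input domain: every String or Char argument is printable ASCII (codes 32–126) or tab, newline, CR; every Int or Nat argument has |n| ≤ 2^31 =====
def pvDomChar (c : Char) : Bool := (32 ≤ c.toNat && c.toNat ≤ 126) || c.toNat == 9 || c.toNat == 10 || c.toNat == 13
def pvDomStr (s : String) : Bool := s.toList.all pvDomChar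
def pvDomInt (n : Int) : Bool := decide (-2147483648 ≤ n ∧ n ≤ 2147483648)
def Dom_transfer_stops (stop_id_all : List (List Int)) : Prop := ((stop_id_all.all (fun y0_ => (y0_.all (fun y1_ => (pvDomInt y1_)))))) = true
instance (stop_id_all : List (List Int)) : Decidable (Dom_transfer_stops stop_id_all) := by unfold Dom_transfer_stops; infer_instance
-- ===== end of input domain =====

-- B replaces A's nested pairwise set intersections (quadratic in the number of routes) by one counting
-- pass over the routes; both Pythons return a set (iteration order unmodelled), so both ports return
-- the canonical ascending-order representative of the set they build.

-- ===== PORT A =====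
-- the set transfer_stops_id as built by A's two nested loops of guarded updates
def pvBuildA (stop_id_all : List (List Int)) : PySem.Set Int :=
  (PySem.List.pyRange 0 ((stop_id_all.length : Int) - 1) 1).foldl (fun acc i =>
    (PySem.List.pyRange (i + 1) (stop_id_all.length : Int) 1).foldl (fun acc k =>
      if PySem.Set.len (PySem.Set.inter (PySem.Set.ofList (PySem.List.pyGetD stop_id_all i []))
            (PySem.Set.ofList (PySem.List.pyGetD stop_id_all k []))) ≠ 0 then
        PySem.Set.update acc (PySem.Set.inter (PySem.Set.ofList (PySem.List.pyGetD stop_id_all i []))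
            (PySem.Set.ofList (PySem.List.pyGetD stop_id_all k [])))
      else acc) acc)
    PySem.Set.empty

def transfer_stops (stop_id_all : List (List Int)) : List Int :=
  -- the returned value is a Python set: canonical sorted representative
  PySem.List.sorted (pvBuildA stop_id_all) (fun x => x) false

-- ===== PORT B =====
-- counts: for each stop id, in how many routes it occurs (each route deduped first)
def pvCountsB (stop_id_all : List (List Int)) : PySem.Dict Int Int :=
  stop_id_all.foldl (fun d route =>
    (PySem.Set.ofList route).foldl (fun d s => PySem.Dict.modify d s 0 (fun c => c + 1)) d)
    (PySem.Dict.mk ([] : List (Int × Int)))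

-- the set comprehension {s for s, c in counts.items() if c >= 2}
def pvBuildB (stop_id_all : List (List Int)) : PySem.Set Int :=
  (pvCountsB stop_id_all).items.foldl
    (fun acc p => if 2 ≤ p.2 then PySem.Set.add acc p.1 else acc) PySem.Set.empty

def transfer_stops_alt (stop_id_all : List (List Int)) : List Int :=
  -- the returned value is a Python set: canonical sorted representative
  PySem.List.sorted (pvBuildB stop_id_all) (fun x => x) false

-- ===== PRECONDITION & SPEC =====
def Spec_transfer_stops (stop_id_all : List (List Int)) (out : List Int) : Prop := out = transfer_stops_alt stop_id_all
instance (stop_id_all : List (List Int)) (out : List Int) : Decidable (Spec_transfer_stops stop_id_all out) := by unfold Spec_transfer_stops; infer_instance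

-- ===== CLAIM (what is proved, stated in full; the proofs are below) =====
def Claim_equal_transfer_stops : Prop := ∀ (stop_id_all : List (List Int)), Dom_transfer_stops stop_id_all → Spec_transfer_stops stop_id_all (transfer_stops stop_id_all)

-- ===== LEMMAS AND PROOFS =====

-- membership in range(a, b) (step 1)
theorem mem_pyRange_one (a b i : Int) : i ∈ PySem.List.pyRange a b 1 ↔ a ≤ i ∧ i < b := by
  unfold PySem.List.pyRange
  norm_num
  constructor
  · rintro ⟨k, hk, rfl⟩
    split_ifs at hk with h <;> omega
  · rintro ⟨h1, h2⟩
    refine ⟨(i - a).toNat, ?_, by omega⟩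
    split_ifs with h <;> omega

-- A's inner loop: membership in a fold of guarded updates
theorem mem_foldl_guard_update (F : Int → PySem.Set Int) (l : List Int) (acc : PySem.Set Int) (x : Int) :
    x ∈ l.foldl (fun acc k => if PySem.Set.len (F k) ≠ 0 then PySem.Set.update acc (F k) else acc) acc ↔
      x ∈ acc ∨ ∃ k ∈ l, x ∈ F k := by
  induction l generalizing acc with
  | nil => simp
  | cons a t ih =>
    simp only [List.foldl_cons, ih, List.mem_cons]
    by_cases h : PySem.Set.len (F a) ≠ 0
    · rw [if_pos h]
      simp only [PySem.Set.mem_update]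
      constructor
      · rintro ((h1 | h1) | ⟨k, hk, hx⟩)
        · exact Or.inl h1
        · exact Or.inr ⟨a, Or.inl rfl, h1⟩
        · exact Or.inr ⟨k, Or.inr hk, hx⟩
      · rintro (h1 | ⟨k, (rfl | hk), hx⟩)
        · exact Or.inl (Or.inl h1)
        · exact Or.inl (Or.inr hx)
        · exact Or.inr ⟨k, hk, hx⟩
    · have hnil : F a = [] := by
        simp only [PySem.Set.len, ne_eq, Int.natCast_eq_zero] at h
        exact List.length_eq_zero_iff.mp (by omega)
      rw [if_neg h]
      constructor
      · rintro (h1 | ⟨k, hk, hx⟩)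
        · exact Or.inl h1
        · exact Or.inr ⟨k, Or.inr hk, hx⟩
      · rintro (h1 | ⟨k, (rfl | hk), hx⟩)
        · exact Or.inl h1
        · rw [hnil] at hx; cases hx
        · exact Or.inr ⟨k, hk, hx⟩

theorem nodup_foldl_guard_update (F : Int → PySem.Set Int) (l : List Int) (acc : PySem.Set Int)
    (h : acc.Nodup) :
    (l.foldl (fun acc k => if PySem.Set.len (F k) ≠ 0 then PySem.Set.update acc (F k) else acc) acc).Nodup := by
  induction l generalizing acc with
  | nil => exact h
  | cons a t ih =>
    simp only [List.foldl_cons]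
    apply ih
    split_ifs with hc
    · exact PySem.Set.nodup_update _ _ h
    · exact h

-- A's nested loops: membership
theorem mem_foldl_outer (F : Int → Int → PySem.Set Int) (S : Int → List Int) (R : List Int)
    (acc : PySem.Set Int) (x : Int) :
    x ∈ R.foldl (fun acc i =>
        (S i).foldl (fun acc k => if PySem.Set.len (F i k) ≠ 0 then PySem.Set.update acc (F i k) else acc) acc) acc ↔
      x ∈ acc ∨ ∃ i ∈ R, ∃ k ∈ S i, x ∈ F i k := by
  induction R generalizing acc with
  | nil => simp
  | cons a t ih =>
    simp only [List.foldl_cons, ih, mem_foldl_guard_update, List.mem_cons]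
    constructor
    · rintro ((h1 | ⟨k, hk, hx⟩) | ⟨i, hi, k, hk, hx⟩)
      · exact Or.inl h1
      · exact Or.inr ⟨a, Or.inl rfl, k, hk, hx⟩
      · exact Or.inr ⟨i, Or.inr hi, k, hk, hx⟩
    · rintro (h1 | ⟨i, (rfl | hi), k, hk, hx⟩)
      · exact Or.inl (Or.inl h1)
      · exact Or.inl (Or.inr ⟨k, hk, hx⟩)
      · exact Or.inr ⟨i, hi, k, hk, hx⟩

theorem nodup_foldl_outer (F : Int → Int → PySem.Set Int) (S : Int → List Int) (R : List Int)
    (acc : PySem.Set Int) (h : acc.Nodup) :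
    (R.foldl (fun acc i =>
        (S i).foldl (fun acc k => if PySem.Set.len (F i k) ≠ 0 then PySem.Set.update acc (F i k) else acc) acc) acc).Nodup := by
  induction R generalizing acc with
  | nil => exact h
  | cons a t ih =>
    simp only [List.foldl_cons]
    exact ih _ (nodup_foldl_guard_update _ _ _ h)

-- an index j with x ∈ l[j] is the same as a route containing x
theorem exists_idx_iff (x : Int) (l : List (List Int)) :
    (∃ j, j < l.length ∧ x ∈ l.getD j []) ↔ ∃ r ∈ l, x ∈ r := by
  constructor
  · rintro ⟨j, hj, hm⟩
    rw [List.getD_eq_getElem l [] hj] at hm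
    exact ⟨l[j], List.getElem_mem hj, hm⟩
  · rintro ⟨r, hr, hm⟩
    obtain ⟨j, hj, rfl⟩ := List.mem_iff_getElem.mp hr
    exact ⟨j, hj, by rwa [List.getD_eq_getElem l [] hj]⟩

-- "x occurs in ≥ 1 route" as an index
theorem one_le_countP_iff (x : Int) (l : List (List Int)) :
    1 ≤ l.countP (fun r => decide (x ∈ r)) ↔ ∃ j, j < l.length ∧ x ∈ l.getD j [] := by
  rw [exists_idx_iff]
  constructor
  · intro h
    obtain ⟨r, hr, hp⟩ := (List.countP_pos_iff (l := l) (p := fun r => decide (x ∈ r))).mp (by omega)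
    exact ⟨r, hr, by simpa using hp⟩
  · rintro ⟨r, hr, hm⟩
    have : 0 < l.countP (fun r => decide (x ∈ r)) := List.countP_pos_iff.mpr ⟨r, hr, by simpa⟩
    omega

-- "x occurs in ≥ 2 routes" as an index pair
theorem two_le_countP_iff (x : Int) (l : List (List Int)) :
    2 ≤ l.countP (fun r => decide (x ∈ r)) ↔
      ∃ i k : ℕ, i < k ∧ k < l.length ∧ x ∈ l.getD i [] ∧ x ∈ l.getD k [] := by
  induction l with
  | nil => simp
  | cons a t ih =>
    rw [List.countP_cons]
    by_cases hx : x ∈ a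
    · have hd : decide (x ∈ a) = true := by simpa
      rw [hd, if_pos rfl]
      constructor
      · intro h
        obtain ⟨j, hj, hm⟩ := (one_le_countP_iff x t).mp (by omega)
        exact ⟨0, j + 1, by omega, by simpa using Nat.succ_lt_succ hj, hx, hm⟩
      · rintro ⟨i, k, hik, hk, hmi, hmk⟩
        obtain ⟨k', rfl⟩ : ∃ k', k = k' + 1 := ⟨k - 1, by omega⟩
        have h1 : 1 ≤ t.countP (fun r => decide (x ∈ r)) :=
          (one_le_countP_iff x t).mpr ⟨k', by simpa using Nat.lt_of_succ_lt_succ hk, hmk⟩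
        omega
    · have hd : decide (x ∈ a) = false := by simpa
      rw [hd]
      simp only [Bool.false_eq_true, if_false, add_zero, ih]
      constructor
      · rintro ⟨i, k, hik, hk, hmi, hmk⟩
        exact ⟨i + 1, k + 1, by omega, by simpa using Nat.succ_lt_succ hk, hmi, hmk⟩
      · rintro ⟨i, k, hik, hk, hmi, hmk⟩
        obtain ⟨k', rfl⟩ : ∃ k', k = k' + 1 := ⟨k - 1, by omega⟩
        match i, hmi with
        | 0, hmi => exact absurd hmi hx
        | i + 1, hmi =>
          exact ⟨i, k', by omega, by simpa using Nat.lt_of_succ_lt_succ hk, hmi, hmk⟩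

-- characterisation of the set A builds
theorem mem_A_iff (l : List (List Int)) (x : Int) :
    x ∈ pvBuildA l ↔ 2 ≤ l.countP (fun r => decide (x ∈ r)) := by
  unfold pvBuildA
  rw [mem_foldl_outer (fun i k => PySem.Set.inter (PySem.Set.ofList (PySem.List.pyGetD l i []))
      (PySem.Set.ofList (PySem.List.pyGetD l k []))), two_le_countP_iff]
  simp only [PySem.Set.mem_inter, PySem.Set.mem_ofList, mem_pyRange_one, PySem.Set.empty]
  constructor
  · rintro (h | ⟨i, ⟨hi0, hi1⟩, k, ⟨hk0, hk1⟩, hxi, hxk⟩)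
    · cases h
    · have hgi := PySem.List.pyGetD_natCast l i.toNat ([] : List Int)
      rw [Int.toNat_of_nonneg (by omega)] at hgi
      have hgk := PySem.List.pyGetD_natCast l k.toNat ([] : List Int)
      rw [Int.toNat_of_nonneg (by omega)] at hgk
      exact ⟨i.toNat, k.toNat, by omega, by omega, by rwa [hgi] at hxi, by rwa [hgk] at hxk⟩
  · rintro ⟨i, k, hik, hk, hmi, hmk⟩
    refine Or.inr ⟨(i : Int), ⟨by omega, by omega⟩, (k : Int), ⟨by omega, by omega⟩, ?_, ?_⟩
    · rwa [PySem.List.pyGetD_natCast]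
    · rwa [PySem.List.pyGetD_natCast]

theorem nodup_A (l : List (List Int)) : (pvBuildA l).Nodup := by
  unfold pvBuildA
  exact nodup_foldl_outer (fun i k => PySem.Set.inter (PySem.Set.ofList (PySem.List.pyGetD l i []))
      (PySem.Set.ofList (PySem.List.pyGetD l k []))) _ _ _ List.nodup_nil

-- B's counter: value at x is the number of routes containing x
theorem counts_getD (routes : List (List Int)) (d : PySem.Dict Int Int) (x : Int) :
    (routes.foldl (fun d route =>
        (PySem.Set.ofList route).foldl (fun d s => PySem.Dict.modify d s 0 (fun c => c + 1)) d) d).getD x 0 =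
      d.getD x 0 + routes.countP (fun r => decide (x ∈ r)) := by
  induction routes generalizing d with
  | nil => simp
  | cons a t ih =>
    simp only [List.foldl_cons, ih, List.countP_cons]
    rw [PySem.Dict.getD_foldl_modify_add_one]
    have hcount : (PySem.Set.ofList a).count x = if x ∈ a then 1 else 0 := by
      by_cases hx : x ∈ a
      · simp only [hx, if_true]
        exact List.count_eq_one_of_mem (PySem.Set.nodup_ofList a) ((PySem.Set.mem_ofList a x).mpr hx)
      · simp only [hx, if_false]
        exact List.count_eq_zero_of_not_mem (fun h => hx ((PySem.Set.mem_ofList a x).mp h))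
    rw [hcount]
    by_cases hx : x ∈ a
    · have hd : decide (x ∈ a) = true := by simpa
      rw [hd]
      simp only [hx, if_true]
      push_cast
      ring
    · have hd : decide (x ∈ a) = false := by simpa
      rw [hd]
      simp only [hx, if_false, Bool.false_eq_true]
      push_cast
      ring

-- B's counter: keys membership and nodup
theorem counts_keys (routes : List (List Int)) (d : PySem.Dict Int Int) :
    (∀ x, x ∈ (routes.foldl (fun d route =>
        (PySem.Set.ofList route).foldl (fun d s => PySem.Dict.modify d s 0 (fun c => c + 1)) d) d).keys ↔
      x ∈ d.keys ∨ ∃ r ∈ routes, x ∈ r) ∧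
    (d.keys.Nodup →
      (routes.foldl (fun d route =>
        (PySem.Set.ofList route).foldl (fun d s => PySem.Dict.modify d s 0 (fun c => c + 1)) d) d).keys.Nodup) := by
  induction routes generalizing d with
  | nil => simp
  | cons a t ih =>
    simp only [List.foldl_cons, List.mem_cons]
    have hkeys : ((PySem.Set.ofList a).foldl (fun d s => PySem.Dict.modify d s 0 (fun c => c + 1)) d).keys =
        PySem.Set.update d.keys (PySem.Set.ofList a) :=
      PySem.Dict.keys_foldl_modify (PySem.Set.ofList a) 0 (fun _ _ v => v + 1) d
    constructor
    · intro x
      rw [(ih _).1, hkeys, PySem.Set.mem_update, PySem.Set.mem_ofList]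
      constructor
      · rintro ((h | h) | ⟨r, hr, hx⟩)
        · exact Or.inl h
        · exact Or.inr ⟨a, Or.inl rfl, h⟩
        · exact Or.inr ⟨r, Or.inr hr, hx⟩
      · rintro (h | ⟨r, (rfl | hr), hx⟩)
        · exact Or.inl (Or.inl h)
        · exact Or.inl (Or.inr hx)
        · exact Or.inr ⟨r, hr, hx⟩
    · intro hnd
      exact (ih _).2 (by rw [hkeys]; exact PySem.Set.nodup_update _ _ hnd)

-- B's comprehension: membership in the built set
theorem mem_foldl_add_if (l : List (Int × Int)) (acc : PySem.Set Int) (x : Int) :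
    x ∈ l.foldl (fun acc p => if 2 ≤ p.2 then PySem.Set.add acc p.1 else acc) acc ↔
      x ∈ acc ∨ ∃ p ∈ l, p.1 = x ∧ 2 ≤ p.2 := by
  induction l generalizing acc with
  | nil => simp
  | cons a t ih =>
    simp only [List.foldl_cons, ih, List.mem_cons]
    by_cases h : (2 : Int) ≤ a.2
    · rw [if_pos h]
      simp only [PySem.Set.mem_add]
      constructor
      · rintro ((h1 | rfl) | ⟨p, hp, hx, hc⟩)
        · exact Or.inl h1
        · exact Or.inr ⟨a, Or.inl rfl, rfl, h⟩
        · exact Or.inr ⟨p, Or.inr hp, hx, hc⟩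
      · rintro (h1 | ⟨p, (rfl | hp), hx, hc⟩)
        · exact Or.inl (Or.inl h1)
        · exact Or.inl (Or.inr hx.symm)
        · exact Or.inr ⟨p, hp, hx, hc⟩
    · rw [if_neg h]
      constructor
      · rintro (h1 | ⟨p, hp, hx, hc⟩)
        · exact Or.inl h1
        · exact Or.inr ⟨p, Or.inr hp, hx, hc⟩
      · rintro (h1 | ⟨p, (rfl | hp), hx, hc⟩)
        · exact Or.inl h1
        · exact absurd hc h
        · exact Or.inr ⟨p, hp, hx, hc⟩

theorem nodup_foldl_add_if (l : List (Int × Int)) (acc : PySem.Set Int) (h : acc.Nodup) :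
    (l.foldl (fun acc p => if 2 ≤ p.2 then PySem.Set.add acc p.1 else acc) acc).Nodup := by
  induction l generalizing acc with
  | nil => exact h
  | cons a t ih =>
    simp only [List.foldl_cons]
    apply ih
    split_ifs
    · exact PySem.Set.nodup_add _ _ h
    · exact h

theorem nodup_B (l : List (List Int)) : (pvBuildB l).Nodup := by
  unfold pvBuildB
  exact nodup_foldl_add_if _ _ List.nodup_nil

-- characterisation of the set B builds
theorem mem_B_iff (l : List (List Int)) (x : Int) :
    x ∈ pvBuildB l ↔ 2 ≤ l.countP (fun r => decide (x ∈ r)) := by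
  have hnd : (pvCountsB l).keys.Nodup := by
    unfold pvCountsB
    exact (counts_keys l _).2 (by simp [PySem.Dict.keys])
  have hgetD : (pvCountsB l).getD x 0 = l.countP (fun r => decide (x ∈ r)) := by
    unfold pvCountsB
    rw [counts_getD]
    simp [PySem.Dict.getD, PySem.Dict.get?]
  unfold pvBuildB
  rw [mem_foldl_add_if]
  simp only [PySem.Set.empty, List.not_mem_nil, false_or]
  constructor
  · rintro ⟨p, hp, rfl, hc⟩
    have hsome : (pvCountsB l).get? p.1 = some p.2 :=
      (PySem.Dict.get?_eq_some_iff_mem_items (pvCountsB l) p.1 p.2 hnd).mpr hp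
    have hval : (pvCountsB l).getD p.1 0 = p.2 := by simp [PySem.Dict.getD, hsome]
    rw [hval] at hgetD
    omega
  · intro h
    rcases hv : (pvCountsB l).get? x with _ | c
    · exfalso
      have : (pvCountsB l).getD x 0 = 0 := by simp [PySem.Dict.getD, hv]
      omega
    · have hc : (2 : Int) ≤ c := by
        have : (pvCountsB l).getD x 0 = c := by simp [PySem.Dict.getD, hv]
        omega
      exact ⟨(x, c), (PySem.Dict.get?_eq_some_iff_mem_items (pvCountsB l) x c hnd).mp hv, rfl, hc⟩

-- two nodup sets with the same members have the same sorted representative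
theorem sorted_sets_eq (SA SB : PySem.Set Int) (hA : SA.Nodup) (hB : SB.Nodup)
    (h : ∀ a, a ∈ SA ↔ a ∈ SB) :
    PySem.List.sorted SA (fun x => x) false = PySem.List.sorted SB (fun x => x) false := by
  have hperm : SA.Perm SB := (List.perm_ext_iff_of_nodup hA hB).mpr h
  have hpB : (PySem.List.sorted SB (fun x => x) false).Perm SA :=
    (PySem.List.sorted_perm SB (fun x => x) false).trans hperm.symm
  have hndS : (PySem.List.sorted SB (fun x => x) false).Nodup :=
    (PySem.List.sorted_perm SB (fun x => x) false).nodup_iff.mpr hB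
  have hsorted : List.Pairwise (fun a b : Int => (fun x : Int => x) a < (fun x : Int => x) b)
      (PySem.List.sorted SB (fun x => x) false) :=
    ((PySem.List.sorted_pairwise SB (fun x : Int => x)).and hndS).imp
      (fun h => lt_of_le_of_ne h.1 h.2)
  exact PySem.List.sorted_eq_of_perm_of_pairwise_lt SA (PySem.List.sorted SB (fun x => x) false)
    (fun x => x) hpB hsorted

-- ===== VERDICT (by name: the statement is the Claim_ definition above) =====
theorem transfer_stops_spec : Claim_equal_transfer_stops := by
  intro l _
  unfold Spec_transfer_stops transfer_stops transfer_stops_alt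
  exact sorted_sets_eq (pvBuildA l) (pvBuildB l) (nodup_A l) (nodup_B l)
    (fun a => (mem_A_iff l a).trans (mem_B_iff l a).symm)
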